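-- pv_equiv track=rewrite | github.com/fabriziogianni7/mercury-agent-wallet | mercury/graph/intent_validation.py | _looks_like_plain_symbol
-- ===== SOURCE A (Python) =====
-- from typing import Any, cast
--
-- def _looks_like_plain_symbol(raw: Any) -> bool:
--     """Heuristic ticker / symbol-ish token that is not hex."""
--
--     if not isinstance(raw, str):
--         return False
--     trimmed = raw.strip()
--     if not trimmed.isascii():
--         return False
--     if trimmed.lower().startswith("0x"):
--         return False
--     if trimmed.isdigit():
--         return False
--     letters = sum(1 for c in trimmed if c.isalpha())
--     if letters < 2:
--         return False
--     allowed = trimmed.replace("_", "")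
--     return allowed.isalnum() and 3 <= len(allowed) <= 16
-- ===== SOURCE B (Python) =====
-- def _looks_like_plain_symbol(raw) -> bool:
--     """Heuristic ticker / symbol-ish token that is not hex (single-pass rewrite)."""
--     if not isinstance(raw, str):
--         return False
--     t = raw.strip()
--     if len(t) >= 2 and t[0] == '0' and (t[1] == 'x' or t[1] == 'X'):
--         return False
--     letters = 0      # alphabetic chars
--     visible = 0      # chars other than '_'
--     ok = True        # every non-underscore char is alphanumeric
--     for c in t:
--         if ord(c) > 127:
--             return False
--         if c != '_':
--             visible += 1
--             if c.isalpha():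
--                 letters += 1
--             elif not c.isdigit():
--                 ok = False
--     return ok and letters >= 2 and 3 <= visible <= 16
-- ===== Notes on version B (the rewrite author's own statement) =====
-- stated objective: alternative
-- what changed: Replaces A's chain of whole-string library passes (ascii check, lowercase-prefix test, digit test, a letter-count pass, underscore removal plus alnum and length tests) by one explicit character loop over the stripped string that maintains a letter count, a non-underscore count and an all-alphanumeric flag, with the hex prefix checked by direct indexing; A's redundant all-digits pass is dropped since requiring two letters already rejects digit-only strings.
import Mathlib
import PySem

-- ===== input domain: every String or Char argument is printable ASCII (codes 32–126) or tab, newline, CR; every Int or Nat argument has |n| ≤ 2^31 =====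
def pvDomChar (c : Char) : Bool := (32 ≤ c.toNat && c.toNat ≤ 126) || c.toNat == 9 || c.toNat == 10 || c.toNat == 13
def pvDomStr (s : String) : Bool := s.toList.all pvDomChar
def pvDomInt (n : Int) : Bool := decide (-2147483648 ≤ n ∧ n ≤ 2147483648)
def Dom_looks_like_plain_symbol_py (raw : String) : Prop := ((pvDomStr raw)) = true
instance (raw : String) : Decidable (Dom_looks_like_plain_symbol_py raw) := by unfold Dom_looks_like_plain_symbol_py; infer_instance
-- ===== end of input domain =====

-- B replaces A's chain of whole-string library passes by one explicit counting loop over the stripped string (objective: alternative decomposition, same cost).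

-- ===== PORT A =====
-- `trimmed.isascii()` is ported by hand (no PySem primitive): all code points ≤ 127, exact
def looks_like_plain_symbol_py (raw : String) : Bool :=
  let trimmed := PySem.Str.strip raw
  if !(trimmed.toList.all (fun c => c.toNat ≤ 127)) then false
  else if PySem.Str.startswith (PySem.Str.lower trimmed) "0x" then false
  else if PySem.Str.strIsdigit trimmed then false
  else
    let letters := trimmed.toList.foldl (fun n c => if PySem.Chars.isalpha c then n + 1 else n) 0
    if letters < 2 then false
    else
      let allowed := PySem.Str.replace trimmed "_" ""
      PySem.Str.strIsalnum allowed && decide (3 ≤ PySem.Str.len allowed ∧ PySem.Str.len allowed ≤ 16)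

-- ===== PORT B =====
-- Source B's prefix test `len(t) >= 2 and t[0] == '0' and (t[1] == 'x' or t[1] == 'X')`
def pvHexPrefix : List Char → Bool
  | c :: d :: _ => c == '0' && (d == 'x' || d == 'X')
  | _ => false

-- Source B's for-loop over the stripped string (the early `return False` on a non-ASCII char is the first branch)
def pvSymLoop : List Char → Nat → Nat → Bool → Bool
  | [], letters, visible, ok => ok && decide (2 ≤ letters) && decide (3 ≤ visible ∧ visible ≤ 16)
  | c :: rest, letters, visible, ok =>
    if 127 < c.toNat then false
    else if c ≠ '_' then
      if PySem.Chars.isalpha c then pvSymLoop rest (letters + 1) (visible + 1) ok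
      else if PySem.Chars.isdigit c then pvSymLoop rest letters (visible + 1) ok
      else pvSymLoop rest letters (visible + 1) false
    else pvSymLoop rest letters visible ok

def looks_like_plain_symbol_py_alt (raw : String) : Bool :=
  let t := (PySem.Str.strip raw).toList
  if pvHexPrefix t then false
  else pvSymLoop t 0 0 true

-- ===== PRECONDITION & SPEC =====
def Spec_looks_like_plain_symbol_py (raw : String) (out : Bool) : Prop := out = looks_like_plain_symbol_py_alt raw
instance (raw : String) (out : Bool) : Decidable (Spec_looks_like_plain_symbol_py raw out) := by unfold Spec_looks_like_plain_symbol_py; infer_instance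

-- ===== CLAIM (what is proved, stated in full; the proofs are below) =====
def Claim_equal_looks_like_plain_symbol_py : Prop := ∀ (raw : String), Dom_looks_like_plain_symbol_py raw → Spec_looks_like_plain_symbol_py raw (looks_like_plain_symbol_py raw)

-- ===== LEMMAS AND PROOFS =====

theorem pvCharEq (a b : Char) : a = b ↔ a.toNat = b.toNat := by
  constructor
  · intro h; rw [h]
  · intro h; apply Char.ext; exact UInt32.toNat_inj.mp h

theorem pvLe (a b : Char) : (a ≤ b) ↔ a.toNat ≤ b.toNat := by
  rw [Char.le_def, UInt32.le_iff_toNat_le]; exact Iff.rfl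

theorem pvLower0 (c : Char) : (PySem.Chars.lowerChar c = '0') ↔ c = '0' := by
  unfold PySem.Chars.lowerChar PySem.Chars.isupper
  split_ifs with h
  · simp only [Bool.and_eq_true, decide_eq_true_eq, pvLe,
      show ('A'.toNat = 65) from rfl, show ('Z'.toNat = 90) from rfl] at h
    simp only [pvCharEq]; rw [Char.toNat_ofNat]
    have hv : Nat.isValidChar (c.toNat + 32) := by
      unfold Nat.isValidChar; left; omega
    rw [if_pos hv]
    show _ ↔ c.toNat = '0'.toNat
    rw [show ('0'.toNat = 48) from rfl]
    omega
  · exact Iff.rfl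

theorem pvLowerX (c : Char) : (PySem.Chars.lowerChar c = 'x') ↔ (c = 'x' ∨ c = 'X') := by
  unfold PySem.Chars.lowerChar PySem.Chars.isupper
  split_ifs with h
  · simp only [Bool.and_eq_true, decide_eq_true_eq, pvLe,
      show ('A'.toNat = 65) from rfl, show ('Z'.toNat = 90) from rfl] at h
    simp only [pvCharEq]; rw [Char.toNat_ofNat]
    have hv : Nat.isValidChar (c.toNat + 32) := by
      unfold Nat.isValidChar; left; omega
    rw [if_pos hv]
    simp only [show ('x'.toNat = 120) from rfl, show ('X'.toNat = 88) from rfl]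
    omega
  · simp only [Bool.and_eq_true, decide_eq_true_eq, pvLe, not_and, not_le,
      show ('A'.toNat = 65) from rfl, show ('Z'.toNat = 90) from rfl] at h
    simp only [pvCharEq]
    simp only [show ('x'.toNat = 120) from rfl, show ('X'.toNat = 88) from rfl]
    omega

theorem pvAlphaNotDigit (c : Char) (h : PySem.Chars.isalpha c = true) :
    PySem.Chars.isdigit c = false := by
  unfold PySem.Chars.isalpha PySem.Chars.isupper PySem.Chars.islower at h
  unfold PySem.Chars.isdigit
  simp only [Bool.or_eq_true, Bool.and_eq_true, decide_eq_true_eq, pvLe,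
      show ('A'.toNat = 65) from rfl, show ('Z'.toNat = 90) from rfl,
      show ('a'.toNat = 97) from rfl, show ('z'.toNat = 122) from rfl] at h
  simp only [Bool.and_eq_false_iff, decide_eq_false_iff_not, pvLe, not_le,
      show ('0'.toNat = 48) from rfl, show ('9'.toNat = 57) from rfl]
  omega

theorem pvFoldCount (p : Char → Bool) : ∀ (cs : List Char) (n : Nat),
    cs.foldl (fun n c => if p c then n + 1 else n) n = n + (cs.filter p).length := by
  intro cs
  induction cs with
  | nil => intro n; simp
  | cons c rest ih =>
    intro n
    by_cases h : p c = true
    · simp [List.foldl, h, ih]; omega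
    · simp only [Bool.not_eq_true] at h
      simp [List.foldl, h, ih]

theorem pvReplaceGo : ∀ (fuel : Nat) (l acc : List Char), l.length ≤ fuel →
    PySem.Chars.replace.go ['_'] [] fuel l acc = acc.reverse ++ l.filter (fun c => !(c == '_')) := by
  intro fuel
  induction fuel with
  | zero => intro l acc h; simp at h; simp [h, PySem.Chars.replace.go]
  | succ n ih =>
    intro l acc h
    match l with
    | [] => simp [PySem.Chars.replace.go]
    | c :: t =>
      rw [PySem.Chars.replace.go]
      by_cases hc : c = '_'
      · have hp : List.isPrefixOf ['_'] (c :: t) = true := by simp [List.isPrefixOf, hc]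
        rw [if_pos hp]
        have hdrop : List.drop (['_'] : List Char).length (c :: t) = t := by simp
        simp only [List.reverse_nil, List.nil_append]
        rw [hdrop, ih t acc (by simpa using h)]
        simp [hc]
      · have hne : ¬ ('_' : Char) = c := fun h' => hc h'.symm
        rw [if_neg (by simp [List.isPrefixOf, hne])]
        rw [ih t (c :: acc) (by simpa using h)]
        simp [hc]

theorem pvReplaceU (cs : List Char) :
    PySem.Chars.replace cs ['_'] [] = cs.filter (fun c => !(c == '_')) := by
  unfold PySem.Chars.replace
  rw [if_neg (by simp)]
  simpa using pvReplaceGo cs.length cs [] le_rfl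

theorem pvSymLoopEq (cs : List Char) : ∀ (l v : Nat) (ok : Bool), (∀ c ∈ cs, c.toNat ≤ 127) →
    pvSymLoop cs l v ok =
      ((ok && cs.all (fun c => c == '_' || PySem.Chars.isalnum c)) &&
       decide (2 ≤ l + (cs.filter PySem.Chars.isalpha).length) &&
       decide (3 ≤ v + (cs.filter (fun c => !(c == '_'))).length ∧
               v + (cs.filter (fun c => !(c == '_'))).length ≤ 16)) := by
  induction cs with
  | nil => intro l v ok h; simp [pvSymLoop]
  | cons c rest ih =>
    intro l v ok h
    have hc127 : ¬ (127 < c.toNat) := by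
      have := h c (by simp); omega
    rw [pvSymLoop, if_neg hc127]
    have hrest : ∀ x ∈ rest, x.toNat ≤ 127 := fun x hx => h x (by simp [hx])
    by_cases hu : c = '_'
    · rw [if_neg (by simp [hu])]
      rw [ih l v ok hrest]
      have : PySem.Chars.isalpha '_' = false := by decide
      simp [hu, this]
    · rw [if_pos (by simp [hu])]
      by_cases ha : PySem.Chars.isalpha c = true
      · rw [if_pos ha, ih (l+1) (v+1) ok hrest]
        simp only [List.all_cons, List.filter_cons, ha,
          PySem.Chars.isalnum, Bool.or_true, Bool.true_or, Bool.true_and]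
        simp [hu, Nat.add_comm, Nat.add_assoc, Nat.add_left_comm]
      · rw [if_neg ha]
        by_cases hd : PySem.Chars.isdigit c = true
        · rw [if_pos hd, ih l (v+1) ok hrest]
          simp only [Bool.not_eq_true] at ha
          simp [ha, hd, hu, PySem.Chars.isalnum, Nat.add_comm, Nat.add_assoc]
        · rw [if_neg hd, ih l (v+1) false hrest]
          simp only [Bool.not_eq_true] at ha hd
          simp [ha, hd, hu, PySem.Chars.isalnum]

theorem pvHexEq (cs : List Char) :
    PySem.Chars.startswith (PySem.Chars.lower cs) ('0' :: ['x']) = pvHexPrefix cs := by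
  match cs with
  | [] => rfl
  | [c] => simp [PySem.Chars.startswith, PySem.Chars.lower, List.isPrefixOf, pvHexPrefix]
  | a :: b :: t =>
    simp only [PySem.Chars.startswith, PySem.Chars.lower, List.map_cons, List.isPrefixOf,
      pvHexPrefix]
    rw [Bool.eq_iff_iff]
    simp only [Bool.and_eq_true, Bool.or_eq_true, beq_iff_eq, Bool.and_true]
    constructor
    · rintro ⟨h1, h2⟩
      exact ⟨pvLower0 a |>.mp h1.symm, (pvLowerX b |>.mp h2.symm).elim (fun h => Or.inl h) (fun h => Or.inr h)⟩
    · rintro ⟨h1, h2⟩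
      exact ⟨((pvLower0 a).mpr h1).symm, ((pvLowerX b).mpr h2).symm⟩

theorem pvStripMem (l : List Char) (c : Char) (h : c ∈ PySem.Chars.strip l) : c ∈ l := by
  unfold PySem.Chars.strip PySem.Chars.rstrip PySem.Chars.lstrip at h
  simp only [List.mem_reverse] at h
  have h1 := (List.dropWhile_sublist _).subset h
  simp only [List.mem_reverse] at h1
  exact (List.dropWhile_sublist _).subset h1

theorem pvAllFilter (cs : List Char) :
    (cs.filter (fun c => !(c == '_'))).all PySem.Chars.isalnum =
      cs.all (fun c => c == '_' || PySem.Chars.isalnum c) := by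
  induction cs with
  | nil => rfl
  | cons c rest ih =>
    by_cases hc : c = '_'
    · simp [hc, ih]
    · have hb : (c == '_') = false := by simp [hc]
      simp [hb, ih]

-- ===== VERDICT (by name: the statement is the Claim_ definition above) =====
theorem looks_like_plain_symbol_py_spec : Claim_equal_looks_like_plain_symbol_py := by
  intro raw hdom
  unfold Spec_looks_like_plain_symbol_py looks_like_plain_symbol_py looks_like_plain_symbol_py_alt
  simp only [PySem.Str.toList_strip]
  set cs := PySem.Chars.strip raw.toList with hcs
  have hascii : ∀ c ∈ cs, c.toNat ≤ 127 := by
    intro c hc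
    have hm : c ∈ raw.toList := pvStripMem _ _ hc
    have := hdom
    unfold Dom_looks_like_plain_symbol_py pvDomStr at this
    rw [List.all_eq_true] at this
    have hd := this c hm
    unfold pvDomChar at hd
    simp only [Bool.or_eq_true, Bool.and_eq_true, decide_eq_true_eq, beq_iff_eq] at hd
    omega
  have hasciiB : cs.all (fun c => c.toNat ≤ 127) = true := by
    rw [List.all_eq_true]; intro c hc; simpa using hascii c hc
  rw [hasciiB]
  simp only [Bool.not_true, Bool.false_eq_true, if_false]
  have hx : PySem.Str.startswith (PySem.Str.lower (PySem.Str.strip raw)) "0x" = pvHexPrefix cs := by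
    rw [PySem.Str.startswith_eq]
    simp only [PySem.Str.toList_lower, PySem.Str.toList_strip, ← hcs]
    exact pvHexEq cs
  rw [hx]
  by_cases hhex : pvHexPrefix cs = true
  · simp [hhex]
  · simp only [Bool.not_eq_true] at hhex
    simp only [hhex, Bool.false_eq_true, if_false]
    rw [pvSymLoopEq cs 0 0 true hascii]
    rw [pvFoldCount PySem.Chars.isalpha cs 0]
    have hallowed : (PySem.Str.replace (PySem.Str.strip raw) "_" "").toList =
        cs.filter (fun c => !(c == '_')) := by
      rw [PySem.Str.toList_replace]
      simp only [PySem.Str.toList_strip, ← hcs]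
      have h1 : ("_" : String).toList = ['_'] := rfl
      have h2 : ("" : String).toList = [] := rfl
      rw [h1, h2, pvReplaceU]
    have hlen : PySem.Str.len (PySem.Str.replace (PySem.Str.strip raw) "_" "") =
        ((cs.filter (fun c => !(c == '_'))).length : Int) := by
      simp [PySem.Str.len_eq, hallowed]
    have halnum : PySem.Str.strIsalnum (PySem.Str.replace (PySem.Str.strip raw) "_" "") =
        (!(cs.filter (fun c => !(c == '_'))).isEmpty &&
          cs.all (fun c => c == '_' || PySem.Chars.isalnum c)) := by
      rw [PySem.Str.strIsalnum_eq, hallowed]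
      unfold PySem.Chars.strIsalnum
      rw [pvAllFilter]
    rw [hlen, halnum]
    by_cases h2 : 2 ≤ (cs.filter PySem.Chars.isalpha).length
    · have hdig : PySem.Str.strIsdigit (PySem.Str.strip raw) = false := by
        rw [PySem.Str.strIsdigit_eq]
        simp only [PySem.Str.toList_strip, ← hcs]
        unfold PySem.Chars.strIsdigit
        have hex : ∃ c ∈ cs, PySem.Chars.isalpha c = true := by
          have hne : cs.filter PySem.Chars.isalpha ≠ [] := by
            intro he; rw [he] at h2; simp at h2
          obtain ⟨c, hc⟩ := List.exists_mem_of_ne_nil _ hne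
          exact ⟨c, (List.mem_filter.mp hc).1, (List.mem_filter.mp hc).2⟩
        obtain ⟨c, hcm, hca⟩ := hex
        have hall : cs.all PySem.Chars.isdigit = false := by
          rw [List.all_eq_false]
          exact ⟨c, hcm, by simp [pvAlphaNotDigit c hca]⟩
        simp [hall]
      rw [hdig]
      simp only [Bool.false_eq_true, if_false]
      rw [if_neg (by omega)]
      have hd2 : decide (2 ≤ 0 + (cs.filter PySem.Chars.isalpha).length) = true := by
        simp; omega
      rw [hd2]
      by_cases h3 : 3 ≤ (cs.filter (fun c => !(c == '_'))).length
      · have hne : (cs.filter (fun c => !(c == '_'))).isEmpty = false := by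
          rw [List.isEmpty_eq_false_iff]; intro he; rw [he] at h3; simp at h3
        rw [hne]
        have hdd : decide (3 ≤ ((cs.filter (fun c => !(c == '_'))).length : Int) ∧
            ((cs.filter (fun c => !(c == '_'))).length : Int) ≤ 16) =
            decide (3 ≤ 0 + (cs.filter (fun c => !(c == '_'))).length ∧
            0 + (cs.filter (fun c => !(c == '_'))).length ≤ 16) := by
          rw [decide_eq_decide]
          constructor
          · intro h; constructor <;> omega
          · intro h; constructor <;> [push_cast; push_cast] <;> omega
        rw [hdd]
        simp [Bool.and_comm, Bool.and_assoc]
      · have hd3 : decide (3 ≤ 0 + (cs.filter (fun c => !(c == '_'))).length ∧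
            0 + (cs.filter (fun c => !(c == '_'))).length ≤ 16) = false := by
          simp; omega
        have hd3' : decide (3 ≤ ((cs.filter (fun c => !(c == '_'))).length : Int) ∧
            ((cs.filter (fun c => !(c == '_'))).length : Int) ≤ 16) = false := by
          rw [decide_eq_false_iff_not]
          intro h
          have := h.1
          omega
        rw [hd3, hd3']
        simp
    · have hd2 : decide (2 ≤ 0 + (cs.filter PySem.Chars.isalpha).length) = false := by
        simp; omega
      rw [hd2]
      simp only [Bool.and_false, Bool.false_and]
      split
      · rfl
      · rw [if_pos (by omega)]
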